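-- pv_equiv track=rewrite | github.com/coingraham/adventofcode | 2019/day16.py | process_FFT
-- ===== SOURCE A (Python) =====
-- from itertools import cycle
--
-- def get_pattern(digit):
--     pattern = []
--     base = [0, 1, 0, -1]
--     for item in base:
--         for i in range(digit):
--             pattern.append(item)
--     pattern.append(pattern.pop(0))
--     return pattern
--
-- def FFT(input, digit):
--     rotate = cycle(get_pattern(digit))
--     total = sum([tup[0] * tup[1] for tup in zip(input, rotate) if tup[1] != 0])
--     value = abs(total) % 10
--     return value
--
-- def process_FFT(input, start, size, section):
--     step = 0
--     while True:
--         new_input = []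
--         for num, value in enumerate(input):
--             new_input.append(FFT(input, num + 1))
--
--         input = new_input
--         step += 1
--
--         if step == section:
--             string_input = ''.join(str(x) for x in input)
--             return string_input
-- ===== SOURCE B (Python) =====
-- def process_FFT(input, start, size, section):
--     # Prefix-sum re-implementation: each output digit is an alternating-sign
--     # sum of contiguous blocks of the input, read off a prefix-sum array.
--     digits = list(input)
--     n = len(digits)
--     for _ in range(section):
--         prefix = [0]
--         for d in digits:
--             prefix.append(prefix[-1] + d)
--         out = []
--         for i in range(n):
--             step = i + 1
--             total = 0
--             sign = 1
--             j = i
--             while j < n: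
--                 total += sign * (prefix[min(j + step, n)] - prefix[j])
--                 sign = -sign
--                 j += 2 * step
--             out.append(abs(total) % 10)
--         digits = out
--     return ''.join(str(x) for x in digits)
-- ===== Notes on version B (the rewrite author's own statement) =====
-- stated objective: faster
-- what changed: Instead of rebuilding the cycled pattern and rescanning the whole input for every output digit, B builds one prefix-sum array per phase and evaluates each digit as an alternating sum of pattern blocks with two prefix lookups per block.
import Mathlib
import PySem

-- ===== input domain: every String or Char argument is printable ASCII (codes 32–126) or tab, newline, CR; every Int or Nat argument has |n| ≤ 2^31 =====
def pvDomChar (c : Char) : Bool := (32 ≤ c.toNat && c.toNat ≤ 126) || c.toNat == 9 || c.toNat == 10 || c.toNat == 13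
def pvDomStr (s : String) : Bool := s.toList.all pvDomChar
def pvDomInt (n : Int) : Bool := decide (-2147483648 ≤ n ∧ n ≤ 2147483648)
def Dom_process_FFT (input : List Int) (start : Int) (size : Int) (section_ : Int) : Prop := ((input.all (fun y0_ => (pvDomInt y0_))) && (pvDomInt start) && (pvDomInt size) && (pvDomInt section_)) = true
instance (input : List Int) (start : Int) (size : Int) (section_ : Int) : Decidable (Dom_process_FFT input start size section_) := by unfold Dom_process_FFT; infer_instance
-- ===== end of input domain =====

-- B replaces A's per-digit rescan of the whole input through the cycled pattern
-- by one prefix-sum array per phase, summing each pattern block with two lookups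
-- (objective: faster). `start` and `size` are unused by both, as in A.

-- ===== PORT A =====
-- pattern.pop(0) on the empty list would raise in Python; that line is only
-- reached with digit ≥ 1 from process_FFT, so the [] branch is unreachable there.
def get_pattern (digit : Int) : List Int :=
  let base : List Int := [0, 1, 0, -1]
  let pattern := base.foldl (fun acc item => acc ++ (PySem.List.pyRange 0 digit 1).map (fun _ => item)) []
  match pattern with
  | [] => []
  | h :: t => t ++ [h]

-- cycle(get_pattern digit) paired with input = index the pattern at position mod its length
def FFT_A (input : List Int) (digit : Int) : Int :=
  let pat := get_pattern digit
  let L := pat.length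
  let total := (((input.zipIdx.map (fun t => (t.1, pat.getD (t.2 % L) 0))).filter
      (fun t => t.2 != 0)).map (fun t => t.1 * t.2)).sum
  Int.ofNat (total.natAbs % 10)

def phaseA (input : List Int) : List Int :=
  input.zipIdx.map (fun t => FFT_A input ((t.2 : Int) + 1))

def loopA : List Int → Nat → List Int
  | inp, 0 => inp
  | inp, Nat.succ k => loopA (phaseA inp) k

def process_FFT (input : List Int) (start : Int) (size : Int) (section_ : Int) : String :=
  PySem.Str.join "" ((loopA input section_.toNat).map PySem.Int.toStr)

-- ===== PORT B =====
-- prefix[-1] of the (never empty) running prefix list = getLastD 0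
def prefixB (ds : List Int) : List Int :=
  ds.foldl (fun p d => p ++ [p.getLastD 0 + d]) [0]

def blockLoop (pre : List Int) (n i : Nat) (j : Nat) (sign total : Int) : Int :=
  if j < n then
    blockLoop pre n i (j + 2 * (i + 1)) (-sign)
      (total + sign * (pre.getD (min (j + (i + 1)) n) 0 - pre.getD j 0))
  else total
termination_by n - j
decreasing_by omega

def phaseB (ds : List Int) : List Int :=
  let pre := prefixB ds
  let n := ds.length
  (List.range n).map (fun i => Int.ofNat ((blockLoop pre n i i 1 0).natAbs % 10))

def loopB : List Int → Nat → List Int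
  | ds, 0 => ds
  | ds, Nat.succ k => loopB (phaseB ds) k

def process_FFT_alt (input : List Int) (start : Int) (size : Int) (section_ : Int) : String :=
  PySem.Str.join "" ((loopB input section_.toNat).map PySem.Int.toStr)

-- ===== PRECONDITION & SPEC =====
-- (no Pre_: the ports agree on every input; Python A diverges for section ≤ 0,
-- where its port returns the joined input after 0 phases — nothing is claimed
-- about Python behaviour there beyond port agreement)
def Spec_process_FFT (input : List Int) (start : Int) (size : Int) (section_ : Int) (out : String) : Prop := out = process_FFT_alt input start size section_
instance (input : List Int) (start : Int) (size : Int) (section_ : Int) (out : String) : Decidable (Spec_process_FFT input start size section_ out) := by unfold Spec_process_FFT; infer_instance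

-- ===== CLAIM (what is proved, stated in full; the proofs are below) =====
def Claim_equal_process_FFT : Prop := ∀ (input : List Int) (start : Int) (size : Int) (section_ : Int), Dom_process_FFT input start size section_ → Spec_process_FFT input start size section_ (process_FFT input start size section_)

-- ===== LEMMAS AND PROOFS =====

def cs (d t : Nat) : Int :=
  if t % (4 * (d + 1)) < d + 1 then 1
  else if 2 * (d + 1) ≤ t % (4 * (d + 1)) ∧ t % (4 * (d + 1)) < 3 * (d + 1) then -1
  else 0

theorem cs_flip (d t : Nat) : cs d (t + 2 * (d + 1)) = -cs d t := by
  unfold cs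
  have h4 : 0 < 4 * (d + 1) := by omega
  have hr : t % (4 * (d + 1)) < 4 * (d + 1) := Nat.mod_lt _ h4
  have key : (t + 2 * (d + 1)) % (4 * (d + 1)) =
      if t % (4 * (d + 1)) < 2 * (d + 1) then t % (4 * (d + 1)) + 2 * (d + 1)
      else t % (4 * (d + 1)) - 2 * (d + 1) := by
    conv_lhs => rw [Nat.add_mod]
    have h2 : 2 * (d + 1) % (4 * (d + 1)) = 2 * (d + 1) := Nat.mod_eq_of_lt (by omega)
    rw [h2]
    split
    · exact Nat.mod_eq_of_lt (by omega)
    · rw [Nat.mod_eq_sub_mod (by omega)]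
      have : t % (4 * (d + 1)) + 2 * (d + 1) - 4 * (d + 1) = t % (4 * (d + 1)) - 2 * (d + 1) := by omega
      rw [this]
      exact Nat.mod_eq_of_lt (by omega)
  rw [key]
  split_ifs <;> omega

theorem zipIdx_map_snd (xs : List Int) (F : Nat → Int) :
    ∀ k, (xs.zipIdx k).map (fun t => F t.2) = (List.range xs.length).map (fun j => F (j + k)) := by
  induction xs with
  | nil => intro k; simp
  | cons x xs ih =>
    intro k
    simp only [List.zipIdx_cons, List.map_cons, List.length_cons, List.range_succ_eq_map,
      List.map_map, ih (k+1)]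
    simp [Function.comp_def]
    intro a _
    ring_nf

theorem sum_filter_map (l : List (Int × Int)) :
    ((l.filter (fun t => t.2 != 0)).map (fun t => t.1 * t.2)).sum =
      (l.map (fun t => t.1 * t.2)).sum := by
  induction l with
  | nil => rfl
  | cons x xs ih =>
    by_cases h : x.2 = 0
    · simp [h, ih]
    · simp [h, ih]

theorem zipIdx_map_sum (xs : List Int) (f : Int → Nat → Int) :
    ∀ k, ((xs.zipIdx k).map (fun t => f t.1 t.2)).sum =
      ∑ j ∈ Finset.range xs.length, f (xs.getD j 0) (j + k) := by
  induction xs with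
  | nil => intro k; simp
  | cons x xs ih =>
    intro k
    rw [List.zipIdx_cons, List.map_cons, List.sum_cons, ih (k+1)]
    rw [show (x :: xs).length = xs.length + 1 from rfl, Finset.sum_range_succ']
    simp only [List.getD_cons_succ, List.getD_cons_zero]
    rw [add_comm]
    rw [Nat.zero_add]
    congr 1
    apply Finset.sum_congr rfl
    intro j _
    congr 1
    omega

def patval (d k : Nat) : Int :=
  if k + 1 < d + 1 then 0
  else if k + 1 < 2 * (d + 1) then 1
  else if k + 1 < 3 * (d + 1) then 0
  else if k + 1 < 4 * (d + 1) then -1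
  else 0

theorem patval_mod (d j : Nat) :
    patval d (j % (4 * (d + 1))) = if j < d then 0 else cs d (j - d) := by
  have h4 : 0 < 4 * (d + 1) := by omega
  by_cases hj : j < d
  · have : j % (4 * (d + 1)) = j := Nat.mod_eq_of_lt (by omega)
    rw [this]
    unfold patval
    split_ifs <;> omega
  · set u := (j - d) % (4 * (d + 1)) with hu
    have hu4 : u < 4 * (d + 1) := Nat.mod_lt _ h4
    have key : j % (4 * (d + 1)) = if u + d < 4 * (d + 1) then u + d else u + d - 4 * (d + 1) := by
      have hjd : j = (j - d) + d := by omega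
      conv_lhs => rw [hjd, Nat.add_mod]
      rw [← hu]
      have hd : d % (4 * (d + 1)) = d := Nat.mod_eq_of_lt (by omega)
      rw [hd]
      split
      · exact Nat.mod_eq_of_lt (by omega)
      · rw [Nat.mod_eq_sub_mod (by omega)]
        exact Nat.mod_eq_of_lt (by omega)
    rw [key]
    unfold patval cs
    rw [← hu]
    split_ifs <;> omega

theorem pyRange_const (d : Nat) (a : Int) :
    (PySem.List.pyRange 0 ((d : Int) + 1) 1).map (fun _ => a) = List.replicate (d + 1) a := by
  rw [PySem.List.pyRange_one, List.map_map]
  have : ((d : Int) + 1 - 0).toNat = d + 1 := by omega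
  rw [this]
  rw [show ((fun _ => a) ∘ fun k : Nat => 0 + (k : Int)) = (fun _ => a) from rfl]
  rw [List.map_const', List.length_range]

theorem get_pattern_eq (d : Nat) :
    get_pattern ((d : Int) + 1) =
      (List.replicate d 0 ++ List.replicate (d + 1) 1 ++ List.replicate (d + 1) 0 ++
        List.replicate (d + 1) (-1)) ++ [0] := by
  unfold get_pattern
  simp only [List.foldl, List.nil_append, pyRange_const]
  rw [show List.replicate (d+1) (0:Int) = 0 :: List.replicate d 0 from rfl]
  simp [List.append_assoc]

theorem get_pattern_length (d : Nat) : (get_pattern ((d : Int) + 1)).length = 4 * (d + 1) := by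
  rw [get_pattern_eq]
  simp
  omega

theorem getD_rep (a : Int) (m k : Nat) (rest : List Int) :
    (List.replicate m a ++ rest).getD k 0 = if k < m then a else rest.getD (k - m) 0 := by
  simp only [List.getD_eq_getElem?_getD]
  split
  · rw [List.getElem?_append_left (by simpa)]
    rw [List.getElem?_replicate, if_pos (by assumption)]
    rfl
  · rw [List.getElem?_append_right (by simp; omega)]
    simp

theorem get_pattern_getD (d k : Nat) : (get_pattern ((d : Int) + 1)).getD k 0 = patval d k := by
  rw [get_pattern_eq]
  simp only [List.append_assoc]
  rw [getD_rep, getD_rep, getD_rep, getD_rep]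
  unfold patval
  have hsing : ∀ t : Nat, ([(0:Int)]).getD t 0 = 0 := by
    intro t
    cases t <;> simp
  rw [hsing]
  split_ifs <;> omega

theorem prefixB_len_getD (ds : List Int) :
    (prefixB ds).length = ds.length + 1 ∧
      ∀ k ≤ ds.length, (prefixB ds).getD k 0 = ∑ x ∈ Finset.range k, ds.getD x 0 := by
  induction ds using List.reverseRecOn with
  | nil =>
    refine ⟨rfl, ?_⟩
    intro k hk
    simp only [List.length_nil, Nat.le_zero] at hk
    subst hk
    simp [prefixB]
  | append_singleton ds d ih =>
    obtain ⟨hlen, hget⟩ := ih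
    have hfold : prefixB (ds ++ [d]) = prefixB ds ++ [(prefixB ds).getLastD 0 + d] := by
      unfold prefixB
      rw [List.foldl_append]
      rfl
    have hne : prefixB ds ≠ [] := by
      intro h; rw [h] at hlen; simp at hlen
    have hlast : (prefixB ds).getLastD 0 = ∑ x ∈ Finset.range ds.length, ds.getD x 0 := by
      rw [List.getLastD_eq_getLast?, List.getLast?_eq_getElem?]
      rw [hlen]
      simp only [Nat.add_sub_cancel]
      rw [← List.getD_eq_getElem?_getD]
      exact hget ds.length le_rfl
    constructor
    · rw [hfold]; simp [hlen]
    · intro k hk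
      simp only [List.length_append, List.length_cons, List.length_nil] at hk
      rw [hfold]
      by_cases hkk : k ≤ ds.length
      · rw [List.getD_append _ _ _ _ (by omega), hget k hkk]
        apply Finset.sum_congr rfl
        intro x hx
        simp only [Finset.mem_range] at hx
        rw [List.getD_eq_getElem?_getD, List.getD_eq_getElem?_getD,
          List.getElem?_append_left (by omega)]
      · have hk1 : k = ds.length + 1 := by omega
        subst hk1
        rw [List.getD_eq_getElem?_getD, List.getElem?_append_right (by omega), hlen]
        have : ds.length + 1 - (ds.length + 1) = 0 := by omega
        rw [this]
        simp only [List.getElem?_cons_zero, Option.getD_some]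
        rw [hlast, Finset.sum_range_succ]
        congr 1
        · apply Finset.sum_congr rfl
          intro x hx
          simp only [Finset.mem_range] at hx
          rw [List.getD_eq_getElem?_getD, List.getD_eq_getElem?_getD,
            List.getElem?_append_left (by omega)]
        · rw [List.getD_eq_getElem?_getD, List.getElem?_append_right (by omega)]
          simp

def S (ds : List Int) (d j : Nat) : Int :=
  ∑ x ∈ Finset.Ico j ds.length, ds.getD x 0 * cs d (x - j)

theorem cs_small (d t : Nat) (h : t < d + 1) : cs d t = 1 := by
  unfold cs
  rw [Nat.mod_eq_of_lt (by omega)]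
  rw [if_pos h]

theorem cs_mid (d t : Nat) (h1 : d + 1 ≤ t) (h2 : t < 2 * (d + 1)) : cs d t = 0 := by
  unfold cs
  rw [Nat.mod_eq_of_lt (by omega)]
  split_ifs <;> omega

theorem pre_sub (ds : List Int) (a b : Nat) (hab : a ≤ b) (hbn : b ≤ ds.length) :
    (prefixB ds).getD b 0 - (prefixB ds).getD a 0 = ∑ x ∈ Finset.Ico a b, ds.getD x 0 := by
  obtain ⟨-, hget⟩ := prefixB_len_getD ds
  rw [hget a (by omega), hget b hbn, Finset.sum_Ico_eq_sub _ hab]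

theorem S_split (ds : List Int) (d j : Nat) (h : j < ds.length) :
    S ds d j = ((prefixB ds).getD (min (j + (d + 1)) ds.length) 0 - (prefixB ds).getD j 0)
      - S ds d (j + 2 * (d + 1)) := by
  set n := ds.length with hn
  set m1 := min (j + (d + 1)) n with hm1
  set m2 := min (j + 2 * (d + 1)) n with hm2
  have h1 : j ≤ m1 := by omega
  have h2 : m1 ≤ m2 := by omega
  have h3 : m2 ≤ n := by omega
  have hsplit : S ds d j =
      (∑ x ∈ Finset.Ico j m1, ds.getD x 0 * cs d (x - j)) +
      (∑ x ∈ Finset.Ico m1 m2, ds.getD x 0 * cs d (x - j)) +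
      (∑ x ∈ Finset.Ico m2 n, ds.getD x 0 * cs d (x - j)) := by
    unfold S
    rw [Finset.sum_Ico_consecutive _ h1 h2, Finset.sum_Ico_consecutive _ (h1.trans h2) h3]
  rw [hsplit]
  have p1 : (∑ x ∈ Finset.Ico j m1, ds.getD x 0 * cs d (x - j)) =
      (prefixB ds).getD m1 0 - (prefixB ds).getD j 0 := by
    rw [pre_sub ds j m1 h1 (by omega)]
    apply Finset.sum_congr rfl
    intro x hx
    simp only [Finset.mem_Ico] at hx
    rw [cs_small d (x - j) (by omega), mul_one]
  have p2 : (∑ x ∈ Finset.Ico m1 m2, ds.getD x 0 * cs d (x - j)) = 0 := by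
    apply Finset.sum_eq_zero
    intro x hx
    simp only [Finset.mem_Ico] at hx
    have hx2 : x < n := by omega
    rw [cs_mid d (x - j) (by omega) (by omega), mul_zero]
  have p3 : (∑ x ∈ Finset.Ico m2 n, ds.getD x 0 * cs d (x - j)) = - S ds d (j + 2 * (d + 1)) := by
    unfold S
    have hset : Finset.Ico (j + 2 * (d + 1)) n = Finset.Ico m2 n := by
      ext x
      simp only [Finset.mem_Ico]
      omega
    rw [hset, ← Finset.sum_neg_distrib]
    apply Finset.sum_congr rfl
    intro x hx
    simp only [Finset.mem_Ico] at hx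
    have hx1 : j + 2 * (d + 1) ≤ x := by omega
    have : x - j = (x - (j + 2 * (d + 1))) + 2 * (d + 1) := by omega
    rw [this, cs_flip]
    ring
  rw [p1, p2, p3]
  ring

theorem blockLoop_eq (ds : List Int) (d : Nat) :
    ∀ j sign total, blockLoop (prefixB ds) ds.length d j sign total = total + sign * S ds d j := by
  have main : ∀ m j, ds.length - j ≤ m → ∀ sign total,
      blockLoop (prefixB ds) ds.length d j sign total = total + sign * S ds d j := by
    intro m
    induction m with
    | zero =>
      intro j hj sign total
      rw [blockLoop, if_neg (by omega)]
      have : S ds d j = 0 := by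
        unfold S
        rw [Finset.Ico_eq_empty (by omega), Finset.sum_empty]
      rw [this]
      ring
    | succ m ih =>
      intro j hj sign total
      by_cases h : j < ds.length
      · rw [blockLoop, if_pos h, ih (j + 2 * (d + 1)) (by omega), S_split ds d j h]
        ring
      · rw [blockLoop, if_neg h]
        have : S ds d j = 0 := by
          unfold S
          rw [Finset.Ico_eq_empty (by omega), Finset.sum_empty]
        rw [this]
        ring
  intro j sign total
  exact main (ds.length - j) j le_rfl sign total

theorem digit_eq (ds : List Int) (d : Nat) :
    FFT_A ds ((d : Int) + 1) =
      Int.ofNat ((blockLoop (prefixB ds) ds.length d d 1 0).natAbs % 10) := by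
  have hsum : ∑ j ∈ Finset.range ds.length, ds.getD j 0 * patval d (j % (4 * (d + 1))) =
      S ds d d := by
    have hterm : ∀ j, ds.getD j 0 * patval d (j % (4 * (d + 1))) =
        if j < d then 0 else ds.getD j 0 * cs d (j - d) := by
      intro j
      rw [patval_mod]
      split_ifs <;> ring
    by_cases hn : d ≤ ds.length
    · rw [Finset.range_eq_Ico, ← Finset.sum_Ico_consecutive _ (Nat.zero_le d) hn]
      have h0 : (∑ j ∈ Finset.Ico 0 d, ds.getD j 0 * patval d (j % (4 * (d + 1)))) = 0 := by
        apply Finset.sum_eq_zero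
        intro j hj
        simp only [Finset.mem_Ico] at hj
        rw [hterm, if_pos (by omega)]
      rw [h0, zero_add]
      apply Finset.sum_congr rfl
      intro j hj
      simp only [Finset.mem_Ico] at hj
      rw [hterm, if_neg (by omega)]
    · have h0 : S ds d d = 0 := by
        unfold S
        rw [Finset.Ico_eq_empty (by omega), Finset.sum_empty]
      rw [h0]
      apply Finset.sum_eq_zero
      intro j hj
      simp only [Finset.mem_range] at hj
      rw [hterm, if_pos (by omega)]
  unfold FFT_A
  dsimp only
  rw [sum_filter_map, List.map_map]
  simp only [Function.comp_def, get_pattern_length, get_pattern_getD]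
  rw [zipIdx_map_sum ds (fun x j => x * patval d (j % (4 * (d + 1)))) 0]
  simp only [Nat.add_zero]
  rw [hsum, blockLoop_eq]
  norm_num

theorem phase_eq (ds : List Int) : phaseA ds = phaseB ds := by
  unfold phaseA phaseB
  dsimp only
  rw [zipIdx_map_snd ds (fun j => FFT_A ds ((j : Int) + 1)) 0]
  apply List.map_congr_left
  intro j _
  simp only [Nat.add_zero]
  exact digit_eq ds j

theorem loop_eq (ds : List Int) (k : Nat) : loopA ds k = loopB ds k := by
  induction k generalizing ds with
  | zero => rfl
  | succ k ih => rw [loopA, loopB, phase_eq, ih]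

-- ===== VERDICT (by name: the statement is the Claim_ definition above) =====
theorem process_FFT_spec : Claim_equal_process_FFT := by
  intro input start size section_ _
  unfold Spec_process_FFT process_FFT process_FFT_alt
  rw [loop_eq]
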